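-- pv_equiv track=rewrite | github.com/idiomaticrefactoring/pythonidiomsrefactor | build/lib/RefactoringIdioms/complicated_code_util.py | get_code_info_with_test_case
-- ===== SOURCE A (Python) =====
-- def get_code_info_with_test_case(dict_comp_file, repo_name):
--     repo_name_list, file_no_test_list, me_no_test_list, code_no_test = set([]), set([]), set([]), 0
--
--     # dict_comp_file = util.load_pkl(save_me_test_me_dir, repo_name)
--     for file_html in dict_comp_file:
--             file_no_test_list.add(file_html)
--             for full_me in dict_comp_file[file_html]:
--                 me_no_test_list.add(full_me)
--                 code_no_test += dict_comp_file[file_html][full_me]["complica_num"]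
--     if   code_no_test:
--         repo_name_list.add(repo_name)
--     return repo_name_list, file_no_test_list, me_no_test_list, code_no_test
-- ===== SOURCE B (Python) =====
-- def get_code_info_with_test_case(dict_comp_file, repo_name):
--     # map: one local summary per file (its own singleton, method-key set, local sum)
--     summaries = [({file_html}, set(methods),
--                   sum(d["complica_num"] for d in methods.values()))
--                  for file_html, methods in dict_comp_file.items()]
--     # reduce: merge the summaries pairwise (divide and conquer)
--     file_no_test_list, me_no_test_list, code_no_test = _merge_summaries(summaries)
--     repo_name_list = {repo_name} if code_no_test else set()
--     return repo_name_list, file_no_test_list, me_no_test_list, code_no_test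
--
-- def _merge_summaries(summaries):
--     if not summaries:
--         return set(), set(), 0
--     if len(summaries) == 1:
--         return summaries[0]
--     mid = len(summaries) // 2
--     f0, m0, c0 = _merge_summaries(summaries[:mid])
--     f1, m1, c1 = _merge_summaries(summaries[mid:])
--     return f0 | f1, m0 | m1, c0 + c1
-- ===== Notes on version B (the rewrite author's own statement) =====
-- stated objective: alternative
-- what changed: Replaces A's single fused nested loop mutating three accumulators with a map/reduce decomposition: each file is first mapped to an independent local summary (singleton file set, method-key set, local complexity sum) and the summaries are then combined by a recursive pairwise divide-and-conquer merge using set union and addition.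
import Mathlib
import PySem

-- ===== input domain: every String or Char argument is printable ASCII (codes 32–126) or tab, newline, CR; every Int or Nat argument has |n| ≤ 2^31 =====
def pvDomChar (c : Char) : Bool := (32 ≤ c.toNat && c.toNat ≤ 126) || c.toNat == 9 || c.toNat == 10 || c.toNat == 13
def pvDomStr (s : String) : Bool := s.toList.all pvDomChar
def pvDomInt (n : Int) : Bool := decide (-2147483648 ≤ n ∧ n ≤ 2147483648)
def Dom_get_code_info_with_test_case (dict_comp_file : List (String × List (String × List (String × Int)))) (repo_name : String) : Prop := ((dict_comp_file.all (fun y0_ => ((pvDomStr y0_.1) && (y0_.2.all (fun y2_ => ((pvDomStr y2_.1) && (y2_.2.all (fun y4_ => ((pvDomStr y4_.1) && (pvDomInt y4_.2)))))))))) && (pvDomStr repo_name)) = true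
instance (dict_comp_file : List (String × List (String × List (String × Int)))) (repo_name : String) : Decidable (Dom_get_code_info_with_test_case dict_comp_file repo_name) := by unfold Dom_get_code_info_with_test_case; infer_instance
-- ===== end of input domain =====

-- B replaces A's single fused nested loop over three mutable accumulators with a map/reduce
-- decomposition: each file is mapped to a local summary and the summaries are merged pairwise
-- (divide and conquer); objective: alternative structure, same cost.


-- ===== PORT A =====
-- 'for file_html in dict_comp_file: … dict_comp_file[file_html] …' iterates the dict's keys and
-- looks each up; with unique keys (Pre_) that visits each (key, value) pair once, so we fold over
-- the pairs — exact. d["complica_num"] raises KeyError when the key is absent (excluded by Pre_),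
-- so the total form getD is exact inside Pre_.
def get_code_info_with_test_case (dict_comp_file : List (String × List (String × List (String × Int)))) (repo_name : String) : List String × List String × List String × Int :=
  let st := dict_comp_file.foldl
    (fun (st : List String × List String × Int) fp =>
      let st1 := (PySem.Set.add st.1 fp.1, st.2.1, st.2.2)
      fp.2.foldl
        (fun (st : List String × List String × Int) mp =>
          (st.1, PySem.Set.add st.2.1 mp.1, st.2.2 + PySem.Dict.getD (PySem.Dict.mk mp.2) "complica_num" 0))
        st1)
    (([] : List String), ([] : List String), (0 : Int))
  -- 'if code_no_test:' — Python truthiness of an int is ≠ 0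
  let repo_name_list : List String :=
    if st.2.2 ≠ 0 then PySem.Set.add PySem.Set.empty repo_name else PySem.Set.empty
  (repo_name_list, st.1, st.2.1, st.2.2)

-- ===== PORT B =====
-- one per-file summary: ({file_html}, set(methods), sum of its complica_num values)
def pvSumm (fp : String × List (String × List (String × Int))) : PySem.Set String × PySem.Set String × Int :=
  (PySem.Set.add PySem.Set.empty fp.1,
   PySem.Set.ofList (fp.2.map Prod.fst),
   (fp.2.map (fun mp => PySem.Dict.getD (PySem.Dict.mk mp.2) "complica_num" 0)).sum)

-- _merge_summaries: pairwise divide-and-conquer merge of the summaries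
def pvMerge (l : List (PySem.Set String × PySem.Set String × Int)) : PySem.Set String × PySem.Set String × Int :=
  match l with
  | [] => (PySem.Set.empty, PySem.Set.empty, 0)
  | [x] => x
  | a :: b :: rest =>
    let xs := a :: b :: rest
    let mid := xs.length / 2
    let L := pvMerge (xs.take mid)
    let R := pvMerge (xs.drop mid)
    (PySem.Set.union L.1 R.1, PySem.Set.union L.2.1 R.2.1, L.2.2 + R.2.2)
termination_by l.length
decreasing_by
  · simp [List.length_take]; omega
  · simp [List.length_drop]; omega

def get_code_info_with_test_case_alt (dict_comp_file : List (String × List (String × List (String × Int)))) (repo_name : String) : List String × List String × List String × Int :=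
  let summaries := dict_comp_file.map pvSumm
  let merged := pvMerge summaries
  let repo_name_list : List String :=
    if merged.2.2 ≠ 0 then PySem.Set.add PySem.Set.empty repo_name else PySem.Set.empty
  (repo_name_list, merged.1, merged.2.1, merged.2.2)

-- ===== PRECONDITION & SPEC =====
-- Pre_ excludes inputs A raises on or that no Python dict represents: every innermost dict must
-- contain the key "complica_num" (otherwise A raises KeyError), and the association lists must have
-- unique keys at every level (duplicate keys are not representable as a Python dict).
def Pre_get_code_info_with_test_case (dict_comp_file : List (String × List (String × List (String × Int)))) (repo_name : String) : Prop :=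
  (dict_comp_file.map Prod.fst).Nodup ∧
  ∀ fp ∈ dict_comp_file, (fp.2.map Prod.fst).Nodup ∧
    ∀ mp ∈ fp.2, (mp.2.map Prod.fst).Nodup ∧ "complica_num" ∈ mp.2.map Prod.fst
instance (dict_comp_file : List (String × List (String × List (String × Int)))) (repo_name : String) : Decidable (Pre_get_code_info_with_test_case dict_comp_file repo_name) := by unfold Pre_get_code_info_with_test_case; infer_instance

def pvWitness_get_code_info_with_test_case : (List (String × List (String × List (String × Int)))) × String :=
  ([("f.py", [("m1", [("complica_num", 2)]), ("m2", [("complica_num", 0)])]), ("g.py", [])], "repo")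

def Spec_get_code_info_with_test_case (dict_comp_file : List (String × List (String × List (String × Int)))) (repo_name : String) (out : List String × List String × List String × Int) : Prop := out = get_code_info_with_test_case_alt dict_comp_file repo_name
instance (dict_comp_file : List (String × List (String × List (String × Int)))) (repo_name : String) (out : List String × List String × List String × Int) : Decidable (Spec_get_code_info_with_test_case dict_comp_file repo_name out) := by unfold Spec_get_code_info_with_test_case; infer_instance

-- ===== CLAIM (what is proved, stated in full; the proofs are below) =====
def Claim_equal_get_code_info_with_test_case : Prop := ∀ (dict_comp_file : List (String × List (String × List (String × Int)))) (repo_name : String), Dom_get_code_info_with_test_case dict_comp_file repo_name → Pre_get_code_info_with_test_case dict_comp_file repo_name → Spec_get_code_info_with_test_case dict_comp_file repo_name (get_code_info_with_test_case dict_comp_file repo_name)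

-- ===== LEMMAS AND PROOFS =====

-- A's inner loop, from an arbitrary state
theorem pv_inner (l : List (String × List (String × Int))) (fs ms : List String) (c : Int) :
    l.foldl (fun (st : List String × List String × Int) mp =>
          (st.1, PySem.Set.add st.2.1 mp.1, st.2.2 + PySem.Dict.getD (PySem.Dict.mk mp.2) "complica_num" 0)) (fs, ms, c)
    = (fs, (l.map Prod.fst).foldl PySem.Set.add ms,
       c + (l.map (fun mp => PySem.Dict.getD (PySem.Dict.mk mp.2) "complica_num" 0)).sum) := by
  induction l generalizing ms c with
  | nil => simp
  | cons hd tl ih => simp [List.foldl_cons, ih]; ring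

-- A's outer loop, from an arbitrary state
theorem pv_outer (l : List (String × List (String × List (String × Int)))) (fs ms : List String) (c : Int) :
    l.foldl (fun (st : List String × List String × Int) fp =>
        (fp.2.foldl (fun (st : List String × List String × Int) mp =>
          (st.1, PySem.Set.add st.2.1 mp.1, st.2.2 + PySem.Dict.getD (PySem.Dict.mk mp.2) "complica_num" 0))
          (PySem.Set.add st.1 fp.1, st.2.1, st.2.2))) (fs, ms, c)
    = ((l.map Prod.fst).foldl PySem.Set.add fs,
       (l.flatMap (fun fp => fp.2.map Prod.fst)).foldl PySem.Set.add ms,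
       c + (l.flatMap (fun fp => fp.2.map (fun mp => PySem.Dict.getD (PySem.Dict.mk mp.2) "complica_num" 0))).sum) := by
  induction l generalizing fs ms c with
  | nil => simp
  | cons hd tl ih =>
    simp only [List.foldl_cons]
    rw [pv_inner, ih]
    simp only [List.flatMap_cons, List.map_cons, List.foldl_cons, List.foldl_append,
      List.sum_append]
    refine Prod.ext rfl (Prod.ext rfl ?_)
    simp only
    ring

-- membership is preserved by folding add
theorem pv_mem_foldl_left (a : String) (t : List String) (s : List String) (h : a ∈ s) :
    a ∈ t.foldl PySem.Set.add s := by
  induction t generalizing s with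
  | nil => exact h
  | cons hd tl ih => exact ih _ ((PySem.Set.mem_add _ _ _).mpr (Or.inl h))

theorem pv_mem_foldl_self (a : String) (t : List String) (s : List String) (h : a ∈ t) :
    a ∈ t.foldl PySem.Set.add s := by
  induction t generalizing s with
  | nil => cases h
  | cons hd tl ih =>
    rcases List.mem_cons.mp h with h | h
    · subst h
      exact pv_mem_foldl_left _ tl _ ((PySem.Set.mem_add _ _ _).mpr (Or.inr rfl))
    · exact ih _ h

theorem pv_foldl_add_add (s t : List String) (a : String) :
    List.foldl PySem.Set.add s (PySem.Set.add t a) = PySem.Set.add (List.foldl PySem.Set.add s t) a := by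
  by_cases h : a ∈ t
  · rw [PySem.Set.add_of_mem h, PySem.Set.add_of_mem (pv_mem_foldl_self a t s h)]
  · rw [PySem.Set.add_of_not_mem h, List.foldl_append]
    rfl

-- folding an already-deduplicated list is folding the original list
theorem pv_foldl_foldl (l : List String) (t s : List String) :
    List.foldl PySem.Set.add s (List.foldl PySem.Set.add t l)
    = List.foldl PySem.Set.add (List.foldl PySem.Set.add s t) l := by
  induction l generalizing t with
  | nil => rfl
  | cons hd tl ih =>
    simp only [List.foldl_cons]
    rw [ih, pv_foldl_add_add]

theorem pv_union_ofList (s : List String) (t : List String) :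
    PySem.Set.union s (PySem.Set.ofList t) = List.foldl PySem.Set.add s t := by
  show List.foldl PySem.Set.add s (List.foldl PySem.Set.add [] t) = _
  rw [pv_foldl_foldl]
  rfl

-- union of two deduplications is the deduplication of the concatenation
theorem pv_ofList_union (A B : List String) :
    PySem.Set.union (PySem.Set.ofList A) (PySem.Set.ofList B) = PySem.Set.ofList (A ++ B) := by
  rw [pv_union_ofList, PySem.Set.ofList_eq_foldl, PySem.Set.ofList_eq_foldl, List.foldl_append]

-- the divide-and-conquer merge of the per-file summaries, characterised
theorem pv_merge_spec_aux : ∀ (n : Nat) (l : List (String × List (String × List (String × Int)))), l.length ≤ n →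
    pvMerge (l.map pvSumm)
    = (PySem.Set.ofList (l.map Prod.fst),
       PySem.Set.ofList (l.flatMap (fun fp => fp.2.map Prod.fst)),
       (l.flatMap (fun fp => fp.2.map (fun mp => PySem.Dict.getD (PySem.Dict.mk mp.2) "complica_num" 0))).sum) := by
  intro n
  induction n with
  | zero =>
    intro l hl
    have : l = [] := List.eq_nil_of_length_eq_zero (Nat.le_zero.mp hl)
    subst this; simp [pvMerge]
  | succ n ih =>
    intro l hl
    match l with
    | [] => simp [pvMerge]
    | [x] =>
      simp [pvMerge, pvSumm, PySem.Set.ofList_cons, PySem.Set.discard]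
    | a :: b :: rest =>
      rw [show (a :: b :: rest).map pvSumm = pvSumm a :: pvSumm b :: rest.map pvSumm from rfl,
          pvMerge]
      set L := a :: b :: rest with hL
      have hlen : (pvSumm a :: pvSumm b :: rest.map pvSumm).length = L.length := by simp [hL]
      have hmapL : L.map pvSumm = pvSumm a :: pvSumm b :: rest.map pvSumm := by simp [hL]
      have h2 : 2 ≤ L.length := by simp [hL]
      have hmap_take : (pvSumm a :: pvSumm b :: rest.map pvSumm).take (((pvSumm a :: pvSumm b :: rest.map pvSumm)).length / 2)
          = (L.take (L.length / 2)).map pvSumm := by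
        rw [hlen, List.map_take, hmapL]
      have hmap_drop : (pvSumm a :: pvSumm b :: rest.map pvSumm).drop (((pvSumm a :: pvSumm b :: rest.map pvSumm)).length / 2)
          = (L.drop (L.length / 2)).map pvSumm := by
        rw [hlen, List.map_drop, hmapL]
      simp only [hmap_take, hmap_drop]
      have hle : L.length ≤ n + 1 := hl
      have hlt1 : (L.take (L.length / 2)).length ≤ n := by
        simp only [List.length_take]; omega
      have hlt2 : (L.drop (L.length / 2)).length ≤ n := by
        simp only [List.length_drop]; omega
      have hsplit : L.take (L.length / 2) ++ L.drop (L.length / 2) = L := List.take_append_drop _ _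
      rw [ih _ hlt1, ih _ hlt2]
      simp only [pv_ofList_union, ← List.map_append, ← List.flatMap_append, ← List.sum_append,
        hsplit]

theorem pv_merge_spec (l : List (String × List (String × List (String × Int)))) :
    pvMerge (l.map pvSumm)
    = (PySem.Set.ofList (l.map Prod.fst),
       PySem.Set.ofList (l.flatMap (fun fp => fp.2.map Prod.fst)),
       (l.flatMap (fun fp => fp.2.map (fun mp => PySem.Dict.getD (PySem.Dict.mk mp.2) "complica_num" 0))).sum) :=
  pv_merge_spec_aux l.length l le_rfl

-- ===== VERDICT (by name: the statement is the Claim_ definition above) =====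
theorem get_code_info_with_test_case_spec : Claim_equal_get_code_info_with_test_case := by
  intro dcf repo _ _
  unfold Spec_get_code_info_with_test_case
  unfold get_code_info_with_test_case get_code_info_with_test_case_alt
  simp only [pv_outer, zero_add, pv_merge_spec, PySem.Set.ofList_eq_foldl]
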